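-- pv_equiv track=rewrite | github.com/josorioam404/crypto_algorithms | vigenere/vigenere_implementation.py | generateKeyword
-- ===== SOURCE A (Python) =====
-- def generateKeyword(t, key, length):
--     keyword = []
--     l = len(key)
--     read = l
--     while length > 0:
--         frame = ""
--         for i in range(t):
--             frame += key[l - read]
--             read -= 1
--             if read == 0:
--                 read = l
--         keyword.append(frame)
--         length -= t
--     return keyword
-- ===== SOURCE B (Python) =====
-- def generateKeyword(t, key, length):
--     if length <= 0:
--         return []
--     numFrames = -(-length // t)          # ceil(length / t): how many frames A's while-loop makes
--     total = numFrames * t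
--     stream = (key * (total // len(key) + 1))[:total]   # the full cyclic key stream, built once
--     return [stream[i:i + t] for i in range(0, total, t)]
-- ===== Notes on version B (the rewrite author's own statement) =====
-- stated objective: alternative
-- what changed: A walks the key one character at a time with a hand-maintained wrap-around cursor inside a while/for nest; B computes the frame count in closed form (ceiling division), materialises the whole cyclic key stream once by string repetition and slicing, and chunks it with a strided-range comprehension.
import Mathlib
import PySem

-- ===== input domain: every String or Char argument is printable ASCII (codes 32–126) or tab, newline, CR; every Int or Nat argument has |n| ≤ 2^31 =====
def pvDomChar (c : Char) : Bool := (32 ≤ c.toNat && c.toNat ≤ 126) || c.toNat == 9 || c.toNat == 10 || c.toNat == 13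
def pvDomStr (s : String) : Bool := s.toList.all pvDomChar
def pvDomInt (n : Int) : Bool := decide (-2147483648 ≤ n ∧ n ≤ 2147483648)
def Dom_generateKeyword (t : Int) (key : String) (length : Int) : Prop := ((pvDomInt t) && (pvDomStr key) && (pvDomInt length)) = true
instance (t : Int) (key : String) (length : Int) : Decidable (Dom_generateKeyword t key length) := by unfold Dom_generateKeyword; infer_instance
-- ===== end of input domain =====

-- B rebuilds the same frame list by closed-form frame count + one cyclic stream + chunking,
-- instead of A's character-cursor while/for nest (objective: alternative decomposition; return value only).

-- ===== PORT A =====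
-- inner `for i in range(t)` loop: builds `frame`, advancing the wrap-around cursor `read`
-- (read stays in [1, l] on admitted inputs; `key[l-read]` is pyGet? with a default that is
-- never used inside Pre_; Nat read is exact wherever the Python returns)
def gkInner (kl : List Char) (l : Nat) : Nat → Nat → List Char → List Char × Nat
  | 0, read, frame => (frame, read)
  | n + 1, read, frame =>
      let c := (PySem.List.pyGet? kl ((l : Int) - (read : Int))).getD ' '
      let read' := read - 1
      let read'' := if read' = 0 then l else read'
      gkInner kl l n read'' (frame ++ [c])

-- outer `while length > 0` loop of A; the `t ≤ 0` branch is ONLY a totality guard: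
-- there the Python diverges (excluded by Pre_)
def gkLoop (t : Int) (kl : List Char) (l : Nat) (length : Int) (read : Nat) : List String :=
  if length ≤ 0 then []
  else if _ht : t ≤ 0 then []
  else
    let p := gkInner kl l t.toNat read []
    String.ofList p.1 :: gkLoop t kl l (length - t) p.2
termination_by length.toNat
decreasing_by omega

def generateKeyword (t : Int) (key : String) (length : Int) : List String :=
  gkLoop t key.toList key.toList.length length key.toList.length

-- ===== PORT B =====
def generateKeyword_alt (t : Int) (key : String) (length : Int) : List String :=
  if length ≤ 0 then []
  else
    let kl := key.toList
    let numFrames := -(PySem.Int.floordiv (-length) t)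
    let total := numFrames * t
    let stream := PySem.List.slice ((List.replicate (PySem.Int.floordiv total (kl.length : Int) + 1).toNat kl).flatten) none (some total)
    (PySem.List.pyRange 0 total t).map (fun i => String.ofList (PySem.List.slice stream (some i) (some (i + t))))

-- ===== PRECONDITION & SPEC =====
-- Pre_ excludes exactly the inputs where the Python A never returns: with frames still to
-- produce (length > 0), t ≤ 0 makes A's while-loop diverge, and an empty key makes
-- `key[l - read]` raise IndexError on the first frame.
def Pre_generateKeyword (t : Int) (key : String) (length : Int) : Prop :=
  length ≤ 0 ∨ (0 < t ∧ key ≠ "")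
instance (t : Int) (key : String) (length : Int) : Decidable (Pre_generateKeyword t key length) := by
  unfold Pre_generateKeyword; infer_instance

def pvWitness_generateKeyword : Int × String × Int := (3, "key", 7)

def Spec_generateKeyword (t : Int) (key : String) (length : Int) (out : List String) : Prop := out = generateKeyword_alt t key length
instance (t : Int) (key : String) (length : Int) (out : List String) : Decidable (Spec_generateKeyword t key length out) := by unfold Spec_generateKeyword; infer_instance

-- ===== CLAIM (what is proved, stated in full; the proofs are below) =====
def Claim_equal_generateKeyword : Prop := ∀ (t : Int) (key : String) (length : Int), Dom_generateKeyword t key length → Pre_generateKeyword t key length → Spec_generateKeyword t key length (generateKeyword t key length)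

-- ===== LEMMAS AND PROOFS =====

-- reference description of both programs: frame j is the t consecutive characters of the
-- cyclic key stream starting at offset s + j*t
def cyc (kl : List Char) (s n : Nat) : List Char :=
  (List.range n).map (fun i => kl.getD ((s + i) % kl.length) ' ')

theorem cyc_mod_add (kl : List Char) (x y n : Nat) :
    cyc kl (x % kl.length + y) n = cyc kl (x + y) n := by
  unfold cyc
  refine List.map_congr_left (fun i _ => ?_)
  rw [Nat.add_assoc, Nat.add_assoc, Nat.mod_add_mod]

theorem cyc_succ (kl : List Char) (s n : Nat) :
    cyc kl s (n + 1) = kl.getD (s % kl.length) ' ' :: cyc kl (s + 1) n := by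
  unfold cyc
  rw [List.range_succ_eq_map, List.map_cons, List.map_map]
  simp [Nat.add_assoc, Nat.add_comm 1]

theorem gkInner_spec (kl : List Char) :
    ∀ (n read : Nat) (frame : List Char), 1 ≤ read → read ≤ kl.length →
      gkInner kl kl.length n read frame =
        (frame ++ cyc kl (kl.length - read) n,
         kl.length - ((kl.length - read + n) % kl.length)) := by
  intro n
  induction n with
  | zero =>
      intro read frame h1 h2
      have : kl.length - read < kl.length := by
        have : 0 < kl.length := by omega
        omega
      simp [gkInner, cyc, Nat.mod_eq_of_lt this]
      omega
  | succ n ih =>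
      intro read frame h1 h2
      have hlpos : 0 < kl.length := by omega
      have hidx : kl.length - read < kl.length := by omega
      have hget : (PySem.List.pyGet? kl ((kl.length : Int) - (read : Int))).getD ' '
          = kl.getD (kl.length - read) ' ' := by
        have hcast : (kl.length : Int) - (read : Int) = ((kl.length - read : Nat) : Int) := by
          omega
        rw [hcast, PySem.List.pyGet?_natCast]
        rfl
      rw [gkInner]
      simp only [hget]
      rw [cyc_succ, Nat.mod_eq_of_lt hidx]
      by_cases hr1 : read - 1 = 0
      · -- read was 1: the cursor wraps back to l
        have hread : read = 1 := by omega
        rw [if_pos hr1, ih kl.length (frame ++ [kl.getD (kl.length - read) ' ']) (by omega) le_rfl]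
        have hc : cyc kl (kl.length - kl.length) n = cyc kl (kl.length - read + 1) n := by
          have h0 : kl.length - kl.length = kl.length % kl.length + 0 := by
            simp [Nat.mod_self]
          have h1' : kl.length - read + 1 = kl.length := by omega
          rw [h0, cyc_mod_add, h1']
          simp
        have hm : (kl.length - kl.length + n) % kl.length
            = (kl.length - read + (n + 1)) % kl.length := by
          have h1' : kl.length - read + (n + 1) = kl.length + n := by omega
          simp [h1', Nat.add_mod_left]
        rw [hc, hm]
        simp
      · rw [if_neg hr1, ih (read - 1) (frame ++ [kl.getD (kl.length - read) ' ']) (by omega) (by omega)]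
        have he : kl.length - (read - 1) = kl.length - read + 1 := by omega
        have hm : kl.length - read + 1 + n = kl.length - read + (n + 1) := by omega
        rw [he, hm]
        simp

-- ceiling-count helpers: -((-a) // t) is the number of iterations of A's while-loop
theorem ceil_bracket (t a : Int) (ht : 0 < t) :
    (-(PySem.Int.floordiv (-a) t) - 1) * t < a ∧ a ≤ -(PySem.Int.floordiv (-a) t) * t :=
  (PySem.Int.neg_floordiv_neg_eq_iff_of_pos ht).mp rfl

theorem ceil_toNat_zero (t a : Int) (ht : 0 < t) (ha : a ≤ 0) :
    (-(PySem.Int.floordiv (-a) t)).toNat = 0 := by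
  have h0 : 0 ≤ PySem.Int.floordiv (-a) t := by
    rw [PySem.Int.floordiv_eq_ediv_of_pos ht]
    exact Int.ediv_nonneg (by omega) (by omega)
  omega

theorem ceil_pos (t a : Int) (ht : 0 < t) (ha : 0 < a) :
    0 < -(PySem.Int.floordiv (-a) t) := by
  obtain ⟨_, hb2⟩ := ceil_bracket t a ht
  nlinarith

theorem ceil_toNat_succ (t a : Int) (ht : 0 < t) (ha : 0 < a) :
    (-(PySem.Int.floordiv (-a) t)).toNat = (-(PySem.Int.floordiv (-(a - t)) t)).toNat + 1 := by
  obtain ⟨hb1, hb2⟩ := ceil_bracket t a ht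
  obtain ⟨hb3, hb4⟩ := ceil_bracket t (a - t) ht
  have h1 : -(PySem.Int.floordiv (-(a - t)) t) * t < -(PySem.Int.floordiv (-a) t) * t := by
    nlinarith
  have h2 : (-(PySem.Int.floordiv (-a) t) - 1) * t < (-(PySem.Int.floordiv (-(a - t)) t) + 1) * t := by
    nlinarith
  have hq1 := lt_of_mul_lt_mul_right h1 (le_of_lt ht)
  have hq2 := lt_of_mul_lt_mul_right h2 (le_of_lt ht)
  have hq3 := ceil_pos t a ht ha
  omega

theorem gkLoop_spec (t : Int) (kl : List Char) (hkl : kl ≠ []) (ht : 0 < t) :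
    ∀ (length : Int) (read : Nat), 1 ≤ read → read ≤ kl.length →
      gkLoop t kl kl.length length read =
        (List.range (-(PySem.Int.floordiv (-length) t)).toNat).map
          (fun j => String.ofList (cyc kl ((kl.length - read) + j * t.toNat) t.toNat)) := by
  have main : ∀ (n : Nat) (length : Int), length.toNat = n →
      ∀ (read : Nat), 1 ≤ read → read ≤ kl.length →
      gkLoop t kl kl.length length read =
        (List.range (-(PySem.Int.floordiv (-length) t)).toNat).map
          (fun j => String.ofList (cyc kl ((kl.length - read) + j * t.toNat) t.toNat)) := by
    intro n
    induction n using Nat.strong_induction_on with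
    | _ n ih =>
      intro length hn read h1 h2
      by_cases hl : length ≤ 0
      · rw [gkLoop, if_pos hl, ceil_toNat_zero t length ht hl]
        simp
      · rw [Int.not_le] at hl
        have hlpos : 0 < kl.length := by
          cases kl with
          | nil => exact absurd rfl hkl
          | cons a l => simp
        rw [gkLoop, if_neg (by omega), dif_neg (by omega),
            gkInner_spec kl t.toNat read [] h1 h2]
        simp only [List.nil_append]
        have hmod : (kl.length - read + t.toNat) % kl.length < kl.length :=
          Nat.mod_lt _ hlpos
        have hr1 : 1 ≤ kl.length - ((kl.length - read + t.toNat) % kl.length) := by omega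
        have hr2 : kl.length - ((kl.length - read + t.toNat) % kl.length) ≤ kl.length := by omega
        rw [ih (length - t).toNat (by omega) (length - t) rfl _ hr1 hr2,
            ceil_toNat_succ t length ht hl, List.range_succ_eq_map, List.map_cons,
            List.map_map]
        congr 1
        · simp
        · refine List.map_congr_left (fun j _ => ?_)
          simp only [Function.comp_apply]
          congr 1
          have he : kl.length - (kl.length - ((kl.length - read + t.toNat) % kl.length))
              = (kl.length - read + t.toNat) % kl.length := by omega
          rw [he, cyc_mod_add]
          congr 1
          rw [Nat.succ_mul]
          omega
  intro length read
  exact main length.toNat length rfl read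

-- the cyclic stream: element i of key * reps is key[i % l]
theorem flat_rep_getD (kl : List Char) (r i : Nat) (hi : i < r * kl.length) :
    (List.replicate r kl).flatten.getD i ' ' = kl.getD (i % kl.length) ' ' := by
  induction r generalizing i with
  | zero => rw [Nat.zero_mul] at hi; omega
  | succ r ih =>
      have hlpos : 0 < kl.length := by
        rcases Nat.eq_zero_or_pos kl.length with h | h
        · rw [h, Nat.mul_zero] at hi; omega
        · exact h
      rw [List.replicate_succ, List.flatten_cons]
      by_cases h : i < kl.length
      · rw [List.getD_append _ _ _ _ h, Nat.mod_eq_of_lt h]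
      · rw [List.getD_append_right _ _ _ _ (by omega),
            ih (i - kl.length) (by rw [Nat.succ_mul] at hi; omega),
            ← Nat.mod_eq_sub_mod (by omega)]

theorem alt_spec (t : Int) (key : String) (length : Int) (hkl : key.toList ≠ [])
    (ht : 0 < t) (hlen : 0 < length) :
    generateKeyword_alt t key length =
      (List.range (-(PySem.Int.floordiv (-length) t)).toNat).map
        (fun j => String.ofList (cyc key.toList (j * t.toNat) t.toNat)) := by
  have hlpos : 0 < key.toList.length := List.length_pos_iff.mpr hkl
  set kl := key.toList with hklv
  set m : Int := -(PySem.Int.floordiv (-length) t) with hm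
  have hm0 : 0 < m := ceil_pos t length ht hlen
  set l : Nat := kl.length with hlv
  set R : Nat := (PySem.Int.floordiv (m * t) (l : Int) + 1).toNat with hR
  set T : Nat := m.toNat * t.toNat with hT
  have htot : m * t = ((T : Nat) : Int) := by
    rw [hT]; push_cast; rw [Int.toNat_of_nonneg (by omega), Int.toNat_of_nonneg (by omega)]
  have hTR : T ≤ R * l := by
    have hlz : (0 : Int) < (l : Int) := Int.natCast_pos.mpr hlpos
    have hfd := PySem.Int.floordiv_mul_add_mod (m * t) (l : Int)
    have hmodlt := PySem.Int.mod_lt (m * t) hlz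
    have hmodnn := PySem.Int.mod_nonneg (m * t) hlz
    have hfdnn : 0 ≤ PySem.Int.floordiv (m * t) (l : Int) := by
      rw [PySem.Int.floordiv_eq_ediv_of_pos hlz]
      exact Int.ediv_nonneg (by nlinarith) (by omega)
    have : ((T : Nat) : Int) ≤ ((R * l : Nat) : Int) := by
      rw [← htot]
      push_cast
      rw [hR, Int.toNat_of_nonneg (by omega : (0 : Int) ≤ PySem.Int.floordiv (m * t) (l : Int) + 1)]
      nlinarith
    exact_mod_cast this
  -- the stream is (take T) of the flattened replication
  have hstream : PySem.List.slice ((List.replicate R kl).flatten) none (some (m * t))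
      = ((List.replicate R kl).flatten).take T := by
    rw [htot, PySem.List.slice_to_natCast]
  have hflatlen : ((List.replicate R kl).flatten).length = R * l := by
    rw [List.length_flatten, List.map_replicate, List.sum_replicate, smul_eq_mul]
  have hslen : (((List.replicate R kl).flatten).take T).length = T := by
    rw [List.length_take, hflatlen]; omega
  -- the strided range is the frame starts
  have hM : ((m * t - 0 + t - 1) / t).toNat = m.toNat := by
    have h1 : m * t - 0 + t - 1 = (t - 1) + m * t := by ring
    rw [h1, Int.add_mul_ediv_right _ _ (by omega),
        Int.ediv_eq_zero_of_lt (by omega) (by omega)]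
    simp
  rw [generateKeyword_alt, if_neg (by omega)]
  simp only [← hklv, ← hm, ← hlv, ← hR, hstream]
  rw [PySem.List.pyRange_of_pos 0 (m * t) ht, if_pos (by nlinarith), hM, List.map_map]
  refine List.map_congr_left (fun k hk => ?_)
  simp only [Function.comp_apply, zero_add]
  have hkm : k < m.toNat := List.mem_range.mp hk
  congr 1
  -- one chunk of the stream is one cyc frame
  have hcast : t * (k : Int) = ((t.toNat * k : Nat) : Int) := by
    push_cast; rw [Int.toNat_of_nonneg (by omega)]
  rw [hcast, show ((t.toNat * k : Nat) : Int) + t = ((t.toNat * k : Nat) : Int) + ((t.toNat : Nat) : Int) by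
        rw [Int.toNat_of_nonneg (by omega)],
      PySem.List.slice_natCast_add]
  have hbound : t.toNat * k + t.toNat ≤ T := by
    rw [hT]; nlinarith [hkm]
  apply List.ext_getElem
  · rw [List.length_take, List.length_drop, hslen]
    simp [cyc]
    omega
  · intro i hi1 hi2
    have hil : i < t.toNat := by
      rw [List.length_take, List.length_drop, hslen] at hi1; omega
    rw [List.getElem_take, List.getElem_drop]
    have hidx : t.toNat * k + i < R * l := by omega
    have := flat_rep_getD kl R (t.toNat * k + i) (by omega)
    rw [List.getD_eq_getElem _ _ (by omega)] at this
    rw [List.getElem_take]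
    simp only [cyc]
    rw [List.getElem_map, List.getElem_range, Nat.mul_comm k t.toNat]
    exact this

-- ===== VERDICT (by name: the statement is the Claim_ definition above) =====
theorem generateKeyword_spec : Claim_equal_generateKeyword := by
  intro t key length _ hpre
  unfold Spec_generateKeyword
  by_cases hlen : length ≤ 0
  · rw [generateKeyword, gkLoop, generateKeyword_alt]
    simp [hlen]
  · rcases hpre with h | ⟨ht, hkey⟩
    · exact absurd h hlen
    have hkl : key.toList ≠ [] := by
      intro h; apply hkey; exact String.ext (by simp [h])
    have hl : 1 ≤ key.toList.length := List.length_pos_iff.mpr hkl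
    rw [generateKeyword, gkLoop_spec t key.toList hkl ht length key.toList.length hl le_rfl,
        alt_spec t key length hkl ht (by omega)]
    simp
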